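-- pv_equiv track=rewrite | github.com/programist13/yandexlyceum | s_r_2_2.py | date_analysis
-- ===== SOURCE A (Python) =====
-- def date_analysis(dates):
--     minn = ''
--     mes = ''
--     res = ''
--     for i in dates:
--         if (int(i[3:5]) == 12) or (int(i[3:5]) == 1) or (int(i[3:5]) == 2):
--             if i[3:5] == '12':
--                 mes = '00'
--             else:
--                 mes = i[3:5]
--             if (minn == '') or (minn > (mes + str(i[0]) + str(i[1]))):
--                 minn = mes + str(i[:2])
--                 res = i
--     return res
-- ===== SOURCE B (Python) =====
-- def date_analysis(dates):
--     winter = [d for d in dates if int(d[3:5]) in (12, 1, 2)]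
--     winter.sort(key=lambda d: ('00' if d[3:5] == '12' else d[3:5]) + d[:2])
--     return winter[0] if winter else ''
-- ===== Notes on version B (the rewrite author's own statement) =====
-- stated objective: idiomatic
-- what changed: Replaced A's explicit min-tracking loop with mutable minn/mes/res state by the idiomatic filter-to-winter-months + stable sort on the same string key + take-first-or-empty pipeline.
import Mathlib
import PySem

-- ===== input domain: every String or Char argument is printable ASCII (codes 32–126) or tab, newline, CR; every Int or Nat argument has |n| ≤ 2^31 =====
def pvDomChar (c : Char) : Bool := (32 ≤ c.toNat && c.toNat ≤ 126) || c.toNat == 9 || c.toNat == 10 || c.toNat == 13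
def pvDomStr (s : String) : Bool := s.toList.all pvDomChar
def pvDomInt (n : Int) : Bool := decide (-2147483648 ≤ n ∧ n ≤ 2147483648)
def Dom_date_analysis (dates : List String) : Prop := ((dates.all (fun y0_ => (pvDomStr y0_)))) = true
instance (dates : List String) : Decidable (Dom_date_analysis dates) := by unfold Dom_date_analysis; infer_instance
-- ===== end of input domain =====

-- B replaces A's explicit min-tracking loop by filter-winter + stable sort on the same string key + take-first (objective: idiomatic).

-- ===== PORT A =====
-- A-side helper: the body of A's for-loop; state = (minn, mes, res)
def pvStepA (s : String × String × String) (i : String) : String × String × String :=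
  match PySem.Int.ofStr? (PySem.Str.slice i (some 3) (some 5)) with
  | none => s  -- int(i[3:5]) raises ValueError here; excluded by Pre_
  | some v =>
    if v = 12 ∨ v = 1 ∨ v = 2 then
      let mes := if PySem.Str.slice i (some 3) (some 5) = "12" then "00"
                 else PySem.Str.slice i (some 3) (some 5)
      match PySem.Str.pyGet? i 0, PySem.Str.pyGet? i 1 with
      | some c0, some c1 =>
        if s.1 = "" ∨ s.1 > mes ++ String.singleton c0 ++ String.singleton c1 then
          (mes ++ PySem.Str.slice i none (some 2), mes, i)
        else (s.1, mes, s.2.2)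
      | _, _ => s  -- unreachable: int(i[3:5]) parsed, so i has length ≥ 4
    else s

def date_analysis (dates : List String) : String :=
  (dates.foldl pvStepA ("", "", "")).2.2

-- ===== PORT B =====
-- B-side helper: the list-comprehension test 'int(d[3:5]) in (12, 1, 2)'
def pvWinter (d : String) : Bool :=
  match PySem.Int.ofStr? (PySem.Str.slice d (some 3) (some 5)) with
  | some v => v == 12 || v == 1 || v == 2
  | none => false  -- int(d[3:5]) raises ValueError here; excluded by Pre_

-- B-side helper: the sort key lambda
def pvKey (d : String) : String :=
  (if PySem.Str.slice d (some 3) (some 5) = "12" then "00"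
   else PySem.Str.slice d (some 3) (some 5)) ++ PySem.Str.slice d none (some 2)

def date_analysis_alt (dates : List String) : String :=
  match PySem.List.sorted (dates.filter pvWinter) pvKey with
  | [] => ""
  | x :: _ => x

-- ===== PRECONDITION & SPEC =====
-- Pre_ excludes exactly the inputs where Python A raises ValueError: some date whose chars 3..5 do not parse as an int.
def Pre_date_analysis (dates : List String) : Prop :=
  ∀ i ∈ dates, (PySem.Int.ofStr? (PySem.Str.slice i (some 3) (some 5))).isSome = true
instance (dates : List String) : Decidable (Pre_date_analysis dates) := by
  unfold Pre_date_analysis; infer_instance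
def pvWitness_date_analysis : List String := ["15.12.2020", "01.01.1999", "20.06.2000"]

def Spec_date_analysis (dates : List String) (out : String) : Prop := out = date_analysis_alt dates
instance (dates : List String) (out : String) : Decidable (Spec_date_analysis dates out) := by unfold Spec_date_analysis; infer_instance

-- ===== CLAIM (what is proved, stated in full; the proofs are below) =====
def Claim_equal_date_analysis : Prop := ∀ (dates : List String), Dom_date_analysis dates → Pre_date_analysis dates → Spec_date_analysis dates (date_analysis dates)

-- ===== LEMMAS AND PROOFS =====

-- "first strict minimum" spec both programs are reduced to
def pvFm (m : String) : List String → String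
  | [] => m
  | x :: t => if pvKey m > pvKey x then pvFm x t else pvFm m t

theorem key_shape (i : String)
    (hi : (PySem.Int.ofStr? (PySem.Str.slice i (some 3) (some 5))).isSome = true) :
    ∃ c0 c1 r, i.toList = c0 :: c1 :: r ∧
      PySem.Str.pyGet? i 0 = some c0 ∧ PySem.Str.pyGet? i 1 = some c1 ∧
      (PySem.Str.slice i none (some 2)).toList = [c0, c1] := by
  have hsl : (PySem.Str.slice i (some 3) (some 5)).toList = List.take 2 (List.drop 3 i.toList) := by
    rw [PySem.Str.toList_slice, PySem.Chars.slice_eq_listSlice, PySem.List.slice_toNat] <;> simp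
  have hne : (PySem.Str.slice i (some 3) (some 5)).toList ≠ [] := by
    intro h
    have he : PySem.Str.slice i (some 3) (some 5) = "" := String.toList_inj.mp (by simpa using h)
    rw [he] at hi
    exact absurd hi (by decide)
  have hlen : 3 < i.toList.length := by
    rcases Nat.lt_or_ge 3 i.toList.length with h | h
    · exact h
    · exact absurd (by rw [hsl, List.drop_eq_nil_of_le h]; rfl) hne
  obtain ⟨a, t1, h1⟩ := List.exists_cons_of_ne_nil (List.ne_nil_of_length_pos (by omega) : i.toList ≠ [])
  have hl1 : t1 ≠ [] := by
    intro he
    rw [h1, he] at hlen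
    simp at hlen
  obtain ⟨b, t2, h2⟩ := List.exists_cons_of_ne_nil hl1
  refine ⟨a, b, t2, by rw [h1, h2], ?_, ?_, ?_⟩
  · simp [h1, h2]
  · simp [h1, h2]
  · rw [PySem.Str.toList_slice, PySem.Chars.slice_eq_listSlice, PySem.List.slice_to, h1, h2] <;> simp

theorem key_append_eq (i : String) (mes : String) (c0 c1 : Char)
    (h2 : (PySem.Str.slice i none (some 2)).toList = [c0, c1]) :
    mes ++ String.singleton c0 ++ String.singleton c1 = mes ++ PySem.Str.slice i none (some 2) := by
  apply String.toList_inj.mp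
  simp [String.toList_append, h2]

theorem key_ne (i : String)
    (hi : (PySem.Int.ofStr? (PySem.Str.slice i (some 3) (some 5))).isSome = true) :
    pvKey i ≠ "" := by
  obtain ⟨c0, c1, r, _, _, _, hs2⟩ := key_shape i hi
  intro h
  have := congrArg String.toList h
  simp [pvKey, String.toList_append, hs2] at this

theorem pvWinter_eq (i : String) (v : Int)
    (hv : PySem.Int.ofStr? (PySem.Str.slice i (some 3) (some 5)) = some v) :
    pvWinter i = decide (v = 12 ∨ v = 1 ∨ v = 2) := by
  unfold pvWinter
  rw [hv]
  by_cases h12 : v = 12 <;> by_cases h1 : v = 1 <;> by_cases h2 : v = 2 <;>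
    simp [h12, h1, h2]

theorem A_run (l : List String)
    (hl : ∀ i ∈ l, (PySem.Int.ofStr? (PySem.Str.slice i (some 3) (some 5))).isSome = true) :
    ∀ (m mes0 : String), pvKey m ≠ "" →
      ∃ mes1, l.foldl pvStepA (pvKey m, mes0, m) =
        (pvKey (pvFm m (l.filter pvWinter)), mes1, pvFm m (l.filter pvWinter)) := by
  induction l with
  | nil => intro m mes0 _; exact ⟨mes0, by simp [pvFm]⟩
  | cons x t ih =>
    intro m mes0 hm
    have hx : (PySem.Int.ofStr? (PySem.Str.slice x (some 3) (some 5))).isSome = true :=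
      hl x (List.mem_cons_self ..)
    have hlt : ∀ i ∈ t, (PySem.Int.ofStr? (PySem.Str.slice i (some 3) (some 5))).isSome = true :=
      fun i hi => hl i (List.mem_cons_of_mem _ hi)
    obtain ⟨v, hv⟩ := Option.isSome_iff_exists.mp hx
    obtain ⟨c0, c1, r, hsh, hg0, hg1, hs2⟩ := key_shape x hx
    have hkeyx : (if PySem.Str.slice x (some 3) (some 5) = "12" then "00"
        else PySem.Str.slice x (some 3) (some 5)) ++ String.singleton c0 ++ String.singleton c1
        = pvKey x := by
      rw [key_append_eq x _ c0 c1 hs2]; rfl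
    by_cases hw : v = 12 ∨ v = 1 ∨ v = 2
    · have hwx : pvWinter x = true := by rw [pvWinter_eq x v hv]; simpa
      have hstep : pvStepA (pvKey m, mes0, m) x =
          if pvKey m > pvKey x
          then (pvKey x, (if PySem.Str.slice x (some 3) (some 5) = "12" then "00"
                else PySem.Str.slice x (some 3) (some 5)), x)
          else (pvKey m, (if PySem.Str.slice x (some 3) (some 5) = "12" then "00"
                else PySem.Str.slice x (some 3) (some 5)), m) := by
        simp only [pvStepA, hv, hg0, hg1, if_pos hw, hkeyx]
        by_cases hgt : pvKey m > pvKey x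
        · rw [if_pos (Or.inr hgt), if_pos hgt]
          rfl
        · rw [if_neg (by simp [hm, hgt]), if_neg hgt]
      rw [List.foldl_cons, hstep, List.filter_cons_of_pos hwx]
      by_cases hgt : pvKey m > pvKey x
      · rw [if_pos hgt]
        obtain ⟨mes1, heq⟩ := ih hlt x (if PySem.Str.slice x (some 3) (some 5) = "12" then "00"
          else PySem.Str.slice x (some 3) (some 5)) (key_ne x hx)
        exact ⟨mes1, by rw [heq]; simp [pvFm, hgt]⟩
      · rw [if_neg hgt]
        obtain ⟨mes1, heq⟩ := ih hlt m (if PySem.Str.slice x (some 3) (some 5) = "12" then "00"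
          else PySem.Str.slice x (some 3) (some 5)) hm
        exact ⟨mes1, by rw [heq]; simp [pvFm, hgt]⟩
    · have hwx : pvWinter x = false := by rw [pvWinter_eq x v hv]; simp [hw]
      have hstep : pvStepA (pvKey m, mes0, m) x = (pvKey m, mes0, m) := by
        simp only [pvStepA, hv, if_neg hw]
      rw [List.foldl_cons, hstep, List.filter_cons_of_neg (by simp [hwx])]
      exact ih hlt m mes0 hm

theorem A_eq (dates : List String) (hp : Pre_date_analysis dates) :
    date_analysis dates =
      match dates.filter pvWinter with
      | [] => ""
      | x :: t => pvFm x t := by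
  induction dates with
  | nil => rfl
  | cons x t ih =>
    have hx : (PySem.Int.ofStr? (PySem.Str.slice x (some 3) (some 5))).isSome = true :=
      hp x (List.mem_cons_self ..)
    have hpt : Pre_date_analysis t := fun i hi => hp i (List.mem_cons_of_mem _ hi)
    obtain ⟨v, hv⟩ := Option.isSome_iff_exists.mp hx
    obtain ⟨c0, c1, r, hsh, hg0, hg1, hs2⟩ := key_shape x hx
    by_cases hw : v = 12 ∨ v = 1 ∨ v = 2
    · have hwx : pvWinter x = true := by rw [pvWinter_eq x v hv]; simpa
      have hstep : pvStepA ("", "", "") x =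
          (pvKey x, (if PySem.Str.slice x (some 3) (some 5) = "12" then "00"
            else PySem.Str.slice x (some 3) (some 5)), x) := by
        simp only [pvStepA, hv, hg0, hg1, if_pos hw]
        rw [if_pos (Or.inl trivial)]
        rfl
      obtain ⟨mes1, heq⟩ := A_run t hpt x (if PySem.Str.slice x (some 3) (some 5) = "12" then "00"
        else PySem.Str.slice x (some 3) (some 5)) (key_ne x hx)
      unfold date_analysis
      rw [List.foldl_cons, hstep, heq, List.filter_cons_of_pos hwx]
    · have hwx : pvWinter x = false := by rw [pvWinter_eq x v hv]; simp [hw]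
      have hstep : pvStepA ("", "", "") x = ("", "", "") := by
        simp only [pvStepA, hv, if_neg hw]
      unfold date_analysis at ih ⊢
      rw [List.foldl_cons, hstep, List.filter_cons_of_neg (by simp [hwx])]
      exact ih hpt

theorem head?_insertBy (x : String) (acc : List String) (h : String) (hh : acc.head? = some h) :
    (PySem.List.insertBy (fun a b => decide (pvKey a < pvKey b)) x acc).head? =
      some (if pvKey x < pvKey h then x else h) := by
  cases acc with
  | nil => simp at hh
  | cons y t =>
    have hy : y = h := by simpa using hh
    subst hy
    simp only [PySem.List.insertBy]
    by_cases hlt : pvKey x < pvKey y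
    · rw [if_pos (by simpa using hlt), if_pos hlt]
      simp
    · rw [if_neg (by simpa using hlt), if_neg hlt]
      simp

theorem head?_foldl_ins (l : List String) :
    ∀ (acc : List String) (h : String), acc.head? = some h →
      (l.foldl (fun a x => PySem.List.insertBy (fun a b => decide (pvKey a < pvKey b)) x a) acc).head? =
        some (pvFm h l) := by
  induction l with
  | nil => intro acc h hh; simpa [pvFm] using hh
  | cons x t ih =>
    intro acc h hh
    rw [List.foldl_cons]
    rw [ih _ _ (head?_insertBy x acc h hh)]
    by_cases hlt : pvKey x < pvKey h
    · rw [if_pos hlt]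
      simp only [pvFm]
      rw [if_pos hlt]
    · rw [if_neg hlt]
      simp only [pvFm]
      rw [if_neg hlt]

theorem alt_eq (dates : List String) :
    date_analysis_alt dates =
      match dates.filter pvWinter with
      | [] => ""
      | x :: t => pvFm x t := by
  unfold date_analysis_alt
  cases hf : dates.filter pvWinter with
  | nil =>
    rw [PySem.List.sorted_eq_foldl_insertBy]
    rfl
  | cons x t =>
    rw [PySem.List.sorted_eq_foldl_insertBy, List.foldl_cons]
    have hone : (PySem.List.insertBy (fun a b => decide (pvKey a < pvKey b)) x
        ([] : List String)) = [x] := by simp [PySem.List.insertBy]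
    rw [hone]
    have hh := head?_foldl_ins t [x] x (by simp)
    cases hL : t.foldl (fun a x => PySem.List.insertBy (fun a b => decide (pvKey a < pvKey b)) x a) [x] with
    | nil => rw [hL] at hh; simp at hh
    | cons y ys =>
      rw [hL] at hh
      simp only [List.head?_cons, Option.some.injEq] at hh
      simp [hh]

-- ===== VERDICT (by name: the statement is the Claim_ definition above) =====
theorem date_analysis_spec : Claim_equal_date_analysis := by
  intro dates _ hp
  unfold Spec_date_analysis
  rw [A_eq dates hp, alt_eq dates]
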